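-- pv_equiv track=rewrite | github.com/jwehring1/EatMyReview | app.py | docFreq
-- ===== SOURCE A (Python) =====
-- def docFreq(dictionary,review,dictionaryTotal):
--     review = review.split() #get the TF vector for each review
--     wordfreq = [0] * dictionaryTotal
--     for revWord in review:
--         found = revWord in dictionary
--         if(found): #throws an error if it's not in the list so this is the workarround
--             wordfreq[dictionary.index(revWord)]+=1
--     return wordfreq
-- ===== SOURCE B (Python) =====
-- def docFreq(dictionary, review, dictionaryTotal):
--     counts = {}
--     for w in review.split():
--         counts[w] = counts.get(w, 0) + 1
--     wordfreq = [0] * dictionaryTotal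
--     for i, w in enumerate(dictionary):
--         if w in counts:
--             wordfreq[i] = counts.pop(w)
--     return wordfreq
-- ===== Notes on version B (the rewrite author's own statement) =====
-- stated objective: alternative
-- what changed: Instead of scanning the dictionary twice per review token ('in' plus '.index'), B builds a frequency dict of the tokens in one pass and then makes a single pass over the dictionary, popping each word's count into its first-occurrence slot.
import Mathlib
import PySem

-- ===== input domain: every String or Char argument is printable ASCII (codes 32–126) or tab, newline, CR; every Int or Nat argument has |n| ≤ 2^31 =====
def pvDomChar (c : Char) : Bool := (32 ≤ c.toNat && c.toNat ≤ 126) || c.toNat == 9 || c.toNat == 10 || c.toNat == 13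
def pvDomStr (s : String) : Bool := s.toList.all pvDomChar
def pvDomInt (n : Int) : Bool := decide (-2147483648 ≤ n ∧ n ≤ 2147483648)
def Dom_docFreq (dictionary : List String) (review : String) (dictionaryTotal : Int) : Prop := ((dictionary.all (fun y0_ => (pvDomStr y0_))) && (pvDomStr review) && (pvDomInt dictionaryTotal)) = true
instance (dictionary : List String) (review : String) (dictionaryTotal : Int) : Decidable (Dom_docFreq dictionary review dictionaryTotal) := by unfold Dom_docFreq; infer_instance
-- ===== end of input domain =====

-- B replaces A's per-token dictionary scans ('in' + '.index') by one token-frequency dict and a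
-- single pass over the dictionary (objective: alternative).

-- ===== PORT A =====
-- loop body of A's 'for revWord in review:'
def docFreqStepA (dictionary : List String) (wf : List Int) (revWord : String) : List Int :=
  let found := dictionary.contains revWord
  if found then
    match PySem.List.index? dictionary revWord with
    | some i => PySem.List.pySetD wf (i : Int) (PySem.List.pyGetD wf (i : Int) 0 + 1)
    | none => wf
  else wf

def docFreq (dictionary : List String) (review : String) (dictionaryTotal : Int) : List Int :=
  let rev := PySem.Str.split₀ review
  let wordfreq := List.replicate dictionaryTotal.toNat (0 : Int)
  rev.foldl (docFreqStepA dictionary) wordfreq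

-- ===== PORT B =====
-- loop body of B's 'for i, w in enumerate(dictionary):' over the state (wordfreq, counts);
-- 'wordfreq[i] = counts.pop(w)' under the guard 'w in counts' is: read the count, erase the key.
def docFreqStepB (st : List Int × PySem.Dict String Int) (p : Int × String) : List Int × PySem.Dict String Int :=
  if st.2.contains p.2 then
    (PySem.List.pySetD st.1 p.1 (st.2.getD p.2 0), st.2.erase p.2)
  else st

def docFreq_alt (dictionary : List String) (review : String) (dictionaryTotal : Int) : List Int :=
  let counts := (PySem.Str.split₀ review).foldl (fun d w => d.insert w (d.getD w 0 + 1)) PySem.Dict.empty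
  let wordfreq := List.replicate dictionaryTotal.toNat (0 : Int)
  ((PySem.List.enumerate dictionary).foldl docFreqStepB (wordfreq, counts)).1

-- ===== PRECONDITION & SPEC =====
-- Pre_ excludes exactly the inputs on which the Python A raises IndexError: some review token that
-- occurs in the dictionary has its first dictionary index ≥ dictionaryTotal.
def Pre_docFreq (dictionary : List String) (review : String) (dictionaryTotal : Int) : Prop :=
  ∀ t ∈ PySem.Str.split₀ review, t ∈ dictionary →
    (((PySem.List.index? dictionary t).getD 0 : Nat) : Int) < dictionaryTotal
instance (dictionary : List String) (review : String) (dictionaryTotal : Int) : Decidable (Pre_docFreq dictionary review dictionaryTotal) := by unfold Pre_docFreq; infer_instance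

def pvWitness_docFreq : List String × String × Int := (["good", "bad"], "good food good", 2)

def Spec_docFreq (dictionary : List String) (review : String) (dictionaryTotal : Int) (out : List Int) : Prop := out = docFreq_alt dictionary review dictionaryTotal
instance (dictionary : List String) (review : String) (dictionaryTotal : Int) (out : List Int) : Decidable (Spec_docFreq dictionary review dictionaryTotal out) := by unfold Spec_docFreq; infer_instance

-- ===== CLAIM (what is proved, stated in full; the proofs are below) =====
def Claim_equal_docFreq : Prop := ∀ (dictionary : List String) (review : String) (dictionaryTotal : Int), Dom_docFreq dictionary review dictionaryTotal → Pre_docFreq dictionary review dictionaryTotal → Spec_docFreq dictionary review dictionaryTotal (docFreq dictionary review dictionaryTotal)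

-- ===== LEMMAS AND PROOFS =====

theorem stepA_mem (D : List String) (wf : List Int) (t : String) (i : Nat)
    (hc : D.contains t = true) (hi : PySem.List.index? D t = some i) :
    docFreqStepA D wf t = wf.set i (wf.getD i 0 + 1) := by
  unfold docFreqStepA
  simp only [hc, if_true, hi, PySem.List.pySetD_natCast, PySem.List.pyGetD_natCast]

theorem stepA_not_mem (D : List String) (wf : List Int) (t : String)
    (hc : D.contains t = false) : docFreqStepA D wf t = wf := by
  unfold docFreqStepA
  simp only [hc, Bool.false_eq_true, if_false]

theorem lengthA (D : List String) (toks : List String) (wf : List Int) :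
    (toks.foldl (docFreqStepA D) wf).length = wf.length := by
  induction toks generalizing wf with
  | nil => rfl
  | cons t toks ih =>
      rw [List.foldl_cons]
      by_cases hc : D.contains t
      · obtain ⟨i, hi⟩ : ∃ i, PySem.List.index? D t = some i :=
          Option.isSome_iff_exists.mp ((PySem.List.index?_isSome_iff D t).mpr (by simpa using hc))
        rw [stepA_mem D wf t i hc hi, ih]
        simp
      · rw [stepA_not_mem D wf t (by simpa using hc), ih]

theorem A_getD (D : List String) (toks : List String) (wf : List Int) (j : Nat) (hj : j < wf.length) :
    (toks.foldl (docFreqStepA D) wf).getD j 0 =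
      wf.getD j 0 + ((toks.countP (fun t => PySem.List.index? D t == some j)) : Int) := by
  induction toks generalizing wf with
  | nil => simp
  | cons t toks ih =>
      rw [List.foldl_cons, List.countP_cons]
      by_cases hc : D.contains t
      · obtain ⟨i, hi⟩ : ∃ i, PySem.List.index? D t = some i :=
          Option.isSome_iff_exists.mp ((PySem.List.index?_isSome_iff D t).mpr (by simpa using hc))
        rw [stepA_mem D wf t i hc hi, ih _ (by simpa using hj), hi]
        by_cases hij : i = j
        · subst hij
          rw [List.getD_eq_getElem _ _ (by simpa using hj), List.getElem_set_self]
          simp only [beq_self_eq_true, if_true]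
          push_cast
          ring
        · have hb : (some i == some j) = false := by simp [hij]
          rw [List.getD_eq_getElem _ _ (by simpa using hj),
              List.getElem_set_ne (by omega), ← List.getD_eq_getElem _ 0 hj, hb]
          simp
      · have hn : PySem.List.index? D t = none := (PySem.List.index?_eq_none_iff D t).mpr (by simpa using hc)
        rw [stepA_not_mem D wf t (by simpa using hc), ih _ hj, hn]
        simp

theorem lengthB (d : List String) (s : Nat) (wf : List Int) (cnt : PySem.Dict String Int) :
    ((PySem.List.enumerate d (s : Int)).foldl docFreqStepB (wf, cnt)).1.length = wf.length := by
  induction d generalizing s wf cnt with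
  | nil => rfl
  | cons w d ih =>
      rw [PySem.List.enumerate_cons, List.foldl_cons]
      by_cases hc : cnt.contains w
      · have hstep : docFreqStepB (wf, cnt) ((s : Int), w)
            = (wf.set s (cnt.getD w 0), cnt.erase w) := by
          unfold docFreqStepB
          simp only [hc, if_true, PySem.List.pySetD_natCast]
        rw [hstep]
        have : ((s : Int) + 1) = ((s + 1 : Nat) : Int) := by push_cast; ring
        rw [this, ih]
        simp
      · have hstep : docFreqStepB (wf, cnt) ((s : Int), w) = (wf, cnt) := by
          unfold docFreqStepB
          simp only [hc, Bool.false_eq_true, if_false]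
        rw [hstep]
        have : ((s : Int) + 1) = ((s + 1 : Nat) : Int) := by push_cast; ring
        rw [this, ih]

theorem dict_contains_erase_self {κ ν : Type} [BEq κ] [LawfulBEq κ] (d : PySem.Dict κ ν) (k : κ) :
    (d.erase k).contains k = false := by
  simp [PySem.Dict.erase, PySem.Dict.contains, List.any_filter]

theorem dict_contains_erase_of_ne {κ ν : Type} [BEq κ] [LawfulBEq κ] (d : PySem.Dict κ ν) (k k' : κ)
    (h : k' ≠ k) : (d.erase k).contains k' = d.contains k' := by
  simp only [PySem.Dict.erase, PySem.Dict.contains, List.any_filter]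
  congr 1
  funext p
  by_cases hp : p.1 = k' <;> simp [hp, h]

theorem dict_getD_erase_of_ne {κ ν : Type} [BEq κ] [LawfulBEq κ] (d : PySem.Dict κ ν) (k k' : κ)
    (v : ν) (h : k' ≠ k) : (d.erase k).getD k' v = d.getD k' v := by
  simp only [PySem.Dict.erase, PySem.Dict.getD, PySem.Dict.get?, List.find?_filter]
  congr 3
  funext p
  by_cases hp : p.1 = k' <;> simp [hp, h]

theorem B_getD (d : List String) (s : Nat) (wf : List Int) (cnt : PySem.Dict String Int)
    (j : Nat) (hj : j < wf.length) :
    ((PySem.List.enumerate d (s : Int)).foldl docFreqStepB (wf, cnt)).1.getD j 0 =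
      if s ≤ j ∧ j - s < d.length ∧ cnt.contains (d.getD (j - s) "") = true ∧
          PySem.List.index? d (d.getD (j - s) "") = some (j - s)
      then cnt.getD (d.getD (j - s) "") 0 else wf.getD j 0 := by
  induction d generalizing s wf cnt with
  | nil => simp
  | cons w d ih =>
      rw [PySem.List.enumerate_cons, List.foldl_cons]
      have hcast : ((s : Int) + 1) = ((s + 1 : Nat) : Int) := by push_cast; ring
      by_cases hc : cnt.contains w
      · have hstep : docFreqStepB (wf, cnt) ((s : Int), w)
            = (wf.set s (cnt.getD w 0), cnt.erase w) := by
          unfold docFreqStepB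
          simp only [hc, if_true, PySem.List.pySetD_natCast]
        rw [hstep, hcast, ih (s + 1) _ _ (by simpa using hj)]
        rcases Nat.lt_trichotomy j s with hjs | hjs | hjs
        · -- j < s : both conditions false, set untouched
          rw [if_neg (by omega), if_neg (by omega)]
          rw [List.getD_eq_getElem _ _ (by simpa using hj),
              List.getElem_set_ne (by omega), ← List.getD_eq_getElem _ 0 hj]
        · -- j = s : assignment happens here
          subst hjs
          rw [if_neg (by omega)]
          rw [List.getD_eq_getElem _ _ (by simpa using hj), List.getElem_set_self]
          have e0 : j - j = 0 := by omega
          rw [if_pos]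
          · simp
          · refine ⟨le_refl _, by simp, ?_, ?_⟩
            · simpa using hc
            · rw [e0, List.getD_cons_zero]
              exact PySem.List.index?_cons_self w d
        · -- s < j
          obtain ⟨m, hm⟩ : ∃ m, j - s = m + 1 := ⟨j - s - 1, by omega⟩
          have hm' : j - (s + 1) = m := by omega
          have hget : (w :: d).getD (j - s) "" = d.getD m "" := by
            rw [hm]; rfl
          have hsetne : (wf.set s (cnt.getD w 0)).getD j 0 = wf.getD j 0 := by
            rw [List.getD_eq_getElem _ _ (by simpa using hj),
                List.getElem_set_ne (by omega), ← List.getD_eq_getElem _ 0 hj]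
          by_cases hww : d.getD m "" = w
          · -- the word at j was already popped at position s: both sides give wf
            rw [if_neg, if_neg]
            · exact hsetne
            · rw [hget, hww, hm]
              rintro ⟨-, -, -, hidx⟩
              rw [PySem.List.index?_cons_self] at hidx
              simp at hidx
            · rw [hm', hww]
              rintro ⟨-, -, hcon, -⟩
              rw [dict_contains_erase_self] at hcon
              simp at hcon
          · have hcon : (cnt.erase w).contains (d.getD m "") = cnt.contains (d.getD m "") :=
              dict_contains_erase_of_ne cnt w _ hww
            have hgd : (cnt.erase w).getD (d.getD m "") 0 = cnt.getD (d.getD m "") 0 :=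
              dict_getD_erase_of_ne cnt w _ 0 hww
            have hidx : PySem.List.index? (w :: d) (d.getD m "") = some (j - s) ↔
                PySem.List.index? d (d.getD m "") = some m := by
              rw [PySem.List.index?_cons_of_ne d (fun h => hww h.symm), hm]
              constructor
              · intro h
                obtain ⟨a, ha, hae⟩ := Option.map_eq_some_iff.mp h
                have ham : a = m := by omega
                subst ham; exact ha
              · intro h
                rw [h]; rfl
            have hcond : (s + 1 ≤ j ∧ m < d.length ∧
                  (cnt.erase w).contains (d.getD m "") = true ∧
                  PySem.List.index? d (d.getD m "") = some m) ↔
                (s ≤ j ∧ j - s < (w :: d).length ∧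
                  cnt.contains (d.getD m "") = true ∧
                  PySem.List.index? (w :: d) (d.getD m "") = some (j - s)) := by
              rw [hcon, hidx]
              constructor
              · rintro ⟨-, h2, h3, h4⟩
                exact ⟨by omega, by simp only [List.length_cons]; omega, h3, h4⟩
              · rintro ⟨-, h2, h3, h4⟩
                refine ⟨by omega, by simp only [List.length_cons] at h2; omega, h3, h4⟩
            simp only [hm', hget, hgd, hsetne]
            simp only [hcond]
      · have hstep : docFreqStepB (wf, cnt) ((s : Int), w) = (wf, cnt) := by
          unfold docFreqStepB
          simp only [hc, Bool.false_eq_true, if_false]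
        rw [hstep, hcast, ih (s + 1) _ _ hj]
        rcases Nat.lt_trichotomy j s with hjs | hjs | hjs
        · rw [if_neg (by omega), if_neg (by omega)]
        · subst hjs
          rw [if_neg (by omega), if_neg]
          have e0 : j - j = 0 := by omega
          rintro ⟨-, -, hcon, -⟩
          rw [e0] at hcon
          simp only [List.getD_cons_zero] at hcon
          exact hc (by simpa using hcon)
        · obtain ⟨m, hm⟩ : ∃ m, j - s = m + 1 := ⟨j - s - 1, by omega⟩
          have hm' : j - (s + 1) = m := by omega
          have hget : (w :: d).getD (j - s) "" = d.getD m "" := by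
            rw [hm]; rfl
          by_cases hww : d.getD m "" = w
          · rw [if_neg, if_neg]
            · rw [hget, hww, hm]
              rintro ⟨-, -, -, hidx⟩
              rw [PySem.List.index?_cons_self] at hidx
              simp at hidx
            · rw [hm', hww]
              rintro ⟨-, -, hcon, -⟩
              exact hc (by simpa using hcon)
          · have hidx : PySem.List.index? (w :: d) (d.getD m "") = some (j - s) ↔
                PySem.List.index? d (d.getD m "") = some m := by
              rw [PySem.List.index?_cons_of_ne d (fun h => hww h.symm), hm]
              constructor
              · intro h
                obtain ⟨a, ha, hae⟩ := Option.map_eq_some_iff.mp h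
                have ham : a = m := by omega
                subst ham; exact ha
              · intro h
                rw [h]; rfl
            have hcond : (s + 1 ≤ j ∧ m < d.length ∧
                  cnt.contains (d.getD m "") = true ∧
                  PySem.List.index? d (d.getD m "") = some m) ↔
                (s ≤ j ∧ j - s < (w :: d).length ∧
                  cnt.contains (d.getD m "") = true ∧
                  PySem.List.index? (w :: d) (d.getD m "") = some (j - s)) := by
              rw [hidx]
              constructor
              · rintro ⟨-, h2, h3, h4⟩
                exact ⟨by omega, by simp only [List.length_cons]; omega, h3, h4⟩
              · rintro ⟨-, h2, h3, h4⟩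
                refine ⟨by omega, by simp only [List.length_cons] at h2; omega, h3, h4⟩
            simp only [hm', hget]
            simp only [hcond]

theorem countP_index (D : List String) (toks : List String) (j : Nat) :
    toks.countP (fun t => PySem.List.index? D t == some j) =
      if j < D.length ∧ PySem.List.index? D (D.getD j "") = some j
      then List.count (D.getD j "") toks else 0 := by
  by_cases h : j < D.length ∧ PySem.List.index? D (D.getD j "") = some j
  · rw [if_pos h, List.count_eq_countP]
    apply List.countP_congr
    intro t ht
    rw [beq_iff_eq, beq_iff_eq]
    constructor
    · intro hidx
      obtain ⟨hk, he, -⟩ := PySem.List.getElem_of_index?_eq_some hidx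
      rw [List.getD_eq_getElem _ _ h.1, he]
    · intro he
      rw [he]
      exact h.2
  · rw [if_neg h, List.countP_eq_zero]
    intro t ht hbt
    rw [beq_iff_eq] at hbt
    obtain ⟨hk, he, -⟩ := PySem.List.getElem_of_index?_eq_some hbt
    exact h ⟨hk, by rw [List.getD_eq_getElem _ _ hk, he]; exact hbt⟩

-- ===== VERDICT (by name: the statement is the Claim_ definition above) =====
theorem docFreq_spec : Claim_equal_docFreq := by
  unfold Claim_equal_docFreq
  intro D rev T _ _
  unfold Spec_docFreq docFreq docFreq_alt
  dsimp only
  rw [PySem.Dict.foldl_insert_getD_add_one_eq_counter]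
  have hlB := lengthB D 0 (List.replicate T.toNat (0 : Int)) (PySem.Dict.counter (PySem.Str.split₀ rev))
  rw [Nat.cast_zero] at hlB
  apply List.ext_getElem
  · rw [lengthA, hlB]
  · intro i h1 h2
    rw [lengthA] at h1
    rw [← List.getD_eq_getElem _ 0, ← List.getD_eq_getElem _ 0]
    rw [A_getD D _ _ i h1]
    have hB := B_getD D 0 (List.replicate T.toNat (0 : Int)) (PySem.Dict.counter (PySem.Str.split₀ rev)) i h1
    rw [Nat.cast_zero] at hB
    rw [hB, countP_index, List.getD_replicate (0 : Int) (show i < T.toNat by simpa using h1)]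
    have hz : i - 0 = i := by omega
    by_cases hc : i < D.length ∧ PySem.List.index? D (D.getD i "") = some i
    · rw [if_pos hc]
      by_cases hw : (D.getD i "") ∈ PySem.Str.split₀ rev
      · rw [if_pos]
        · rw [hz, PySem.Dict.getD_counter]
          ring
        · refine ⟨by omega, by rw [hz]; exact hc.1, ?_, by rw [hz]; exact hc.2⟩
          rw [hz, PySem.Dict.contains_counter]
          simpa using hw
      · rw [if_neg, List.count_eq_zero.mpr hw]
        · ring
        · rw [hz, PySem.Dict.contains_counter]
          rintro ⟨-, -, hcon, -⟩
          exact hw (by simpa using hcon)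
    · rw [if_neg hc, if_neg]
      · norm_num
      · rintro ⟨-, h2', -, h4⟩
        rw [hz] at h2' h4
        exact hc ⟨h2', h4⟩
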